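-- pv_equiv track=rewrite | github.com/RKnOT/Lineare_Algebra | Utils.py | get_tail_of_vectors
-- ===== SOURCE A (Python) =====
-- def vektor_delta(v1, v2):
--     return [v1[0]- v2[0], v1[1]- v2[1]]
--
-- def get_tail_of_vectors(v):
--     tail = []
--     for i in range(0, len(v)):
--         if i == len(v)-1:
--             d = vektor_delta(v[0], v[i])
--         else:
--             d = vektor_delta(v[i+1], v[i])
--         tail.append(d)
--     return (tail)
-- ===== SOURCE B (Python) =====
-- def get_tail_of_vectors(v):
--     if not v:
--         return []
--
--     def walk(cur, rest):
--         if not rest: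
--             # wrapped around: close the cycle back to the first vector
--             return [[v[0][0] - cur[0], v[0][1] - cur[1]]]
--         nxt = rest[0]
--         return [[nxt[0] - cur[0], nxt[1] - cur[1]]] + walk(nxt, rest[1:])
--
--     return walk(v[0], v[1:])
-- ===== Notes on version B (the rewrite author's own statement) =====
-- stated objective: alternative
-- what changed: Replaces the index loop with its last-iteration wrap branch by a structural pairwise recursion that threads the current vector through the rest of the list (never indexing into v), closing the cycle against the saved first vector at the base case.
import Mathlib
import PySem

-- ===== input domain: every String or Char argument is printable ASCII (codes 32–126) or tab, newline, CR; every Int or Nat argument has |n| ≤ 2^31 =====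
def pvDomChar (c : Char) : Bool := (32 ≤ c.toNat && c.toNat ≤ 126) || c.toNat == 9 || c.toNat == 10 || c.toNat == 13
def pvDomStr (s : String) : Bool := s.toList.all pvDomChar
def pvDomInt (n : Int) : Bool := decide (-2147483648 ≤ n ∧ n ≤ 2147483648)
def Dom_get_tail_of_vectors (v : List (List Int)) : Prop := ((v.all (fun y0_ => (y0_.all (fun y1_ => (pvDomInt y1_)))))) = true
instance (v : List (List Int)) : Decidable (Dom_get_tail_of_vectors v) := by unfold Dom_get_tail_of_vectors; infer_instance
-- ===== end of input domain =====

-- ===== PORT A =====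
-- One honest line: B replaces A's index loop and last-iteration wrap branch by a structural
-- pairwise recursion threading the current vector; same cost, return value only.
def vektor_delta (v1 v2 : List Int) : List Int :=
  [PySem.List.pyGetD v1 0 0 - PySem.List.pyGetD v2 0 0,
   PySem.List.pyGetD v1 1 0 - PySem.List.pyGetD v2 1 0]

def get_tail_of_vectors (v : List (List Int)) : List (List Int) :=
  (PySem.List.pyRange 0 (v.length : Int) 1).foldl (fun tail i =>
    tail ++ [if i = (v.length : Int) - 1 then
               vektor_delta (PySem.List.pyGetD v 0 []) (PySem.List.pyGetD v i [])
             else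
               vektor_delta (PySem.List.pyGetD v (i + 1) []) (PySem.List.pyGetD v i [])]) []

-- ===== PORT B =====
-- walk(cur, rest) from Source B; `first` is the closed-over v[0].
def gtov_walk (first : List Int) (cur : List Int) : List (List Int) → List (List Int)
  | [] => [[PySem.List.pyGetD first 0 0 - PySem.List.pyGetD cur 0 0,
            PySem.List.pyGetD first 1 0 - PySem.List.pyGetD cur 1 0]]
  | nxt :: rest =>
      [PySem.List.pyGetD nxt 0 0 - PySem.List.pyGetD cur 0 0,
       PySem.List.pyGetD nxt 1 0 - PySem.List.pyGetD cur 1 0] :: gtov_walk first nxt rest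

def get_tail_of_vectors_alt (v : List (List Int)) : List (List Int) :=
  match v with
  | [] => []
  | x :: rest => gtov_walk x x rest

-- ===== PRECONDITION & SPEC =====
-- Pre_ excludes exactly the inputs where A raises IndexError: some vector has fewer than 2 components
-- (B raises there too).
def Pre_get_tail_of_vectors (v : List (List Int)) : Prop := ∀ x ∈ v, 2 ≤ x.length
instance (v : List (List Int)) : Decidable (Pre_get_tail_of_vectors v) := by unfold Pre_get_tail_of_vectors; infer_instance
def pvWitness_get_tail_of_vectors : List (List Int) := [[1, 2], [3, 5], [0, -1]]
def Spec_get_tail_of_vectors (v : List (List Int)) (out : List (List Int)) : Prop := out = get_tail_of_vectors_alt v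
instance (v : List (List Int)) (out : List (List Int)) : Decidable (Spec_get_tail_of_vectors v out) := by unfold Spec_get_tail_of_vectors; infer_instance

-- ===== CLAIM (what is proved, stated in full; the proofs are below) =====
def Claim_equal_get_tail_of_vectors : Prop := ∀ (v : List (List Int)), Dom_get_tail_of_vectors v → Pre_get_tail_of_vectors v → Spec_get_tail_of_vectors v (get_tail_of_vectors v)

-- ===== LEMMAS AND PROOFS =====

theorem gtov_walk_length (first cur : List Int) (rest : List (List Int)) :
    (gtov_walk first cur rest).length = rest.length + 1 := by
  induction rest generalizing cur with
  | nil => rfl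
  | cons nxt rest ih => simp [gtov_walk, ih nxt]

-- B's walk, elementwise: pairs each vector with its successor, wrapping to `first`.
theorem gtov_walk_getElem (first cur : List Int) (rest : List (List Int))
    (k : Nat) (hk : k < rest.length + 1) (h2 : k < (gtov_walk first cur rest).length) :
    (gtov_walk first cur rest)[k] =
      vektor_delta ((rest ++ [first]).getD k []) ((cur :: rest).getD k []) := by
  induction rest generalizing cur k with
  | nil =>
      have hk0 : k = 0 := by simp at hk; omega
      subst hk0
      simp [gtov_walk, vektor_delta]
  | cons nxt rest ih =>
      cases k with
      | zero => simp [gtov_walk, vektor_delta]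
      | succ k =>
          have := ih nxt k (by simpa using hk) (by rw [gtov_walk_length]; simpa using hk)
          simp only [gtov_walk, List.getElem_cons_succ, this]
          simp

-- A's loop is a map over range(len(v)).
theorem portA_eq_map (v : List (List Int)) :
    get_tail_of_vectors v =
      (PySem.List.pyRange 0 (v.length : Int) 1).map (fun i =>
        if i = (v.length : Int) - 1 then
          vektor_delta (PySem.List.pyGetD v 0 []) (PySem.List.pyGetD v i [])
        else
          vektor_delta (PySem.List.pyGetD v (i + 1) []) (PySem.List.pyGetD v i [])) := by
  unfold get_tail_of_vectors
  rw [PySem.List.foldl_append_singleton_eq_map]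
  simp

-- The two ports agree elementwise on a nonempty list.
theorem portA_eq_walk (x : List Int) (rest : List (List Int)) :
    get_tail_of_vectors (x :: rest) = gtov_walk x x rest := by
  rw [portA_eq_map]
  apply List.ext_getElem
  · simp [PySem.List.length_pyRange_one, gtov_walk_length]
  · intro k hk hk2
    simp only [List.length_map, PySem.List.length_pyRange_one] at hk
    have hkr : k < rest.length + 1 := by simpa using hk
    rw [List.getElem_map, PySem.List.getElem_pyRange_one,
      gtov_walk_getElem x x rest k hkr hk2]
    have hc0 : ((0 : Int) + (k : Int)) = ((k : Nat) : Int) := by ring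
    by_cases h : k = rest.length
    · rw [if_pos (by simp; omega), hc0, PySem.List.pyGetD_natCast]
      subst h
      congr 1
      · rw [PySem.List.pyGetD_zero_cons, List.getD_eq_getElem?_getD,
          List.getElem?_append_right le_rfl]
        simp
    · rw [if_neg (by simp; omega),
        show ((0 : Int) + (k : Int) + 1) = ((k + 1 : Nat) : Int) from by push_cast; ring,
        hc0, PySem.List.pyGetD_natCast, PySem.List.pyGetD_natCast]
      congr 1
      rw [List.getD_eq_getElem?_getD, List.getD_eq_getElem?_getD,
        List.getElem?_append_left (by omega), List.getElem?_cons_succ]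

-- ===== VERDICT (by name: the statement is the Claim_ definition above) =====
theorem get_tail_of_vectors_spec : Claim_equal_get_tail_of_vectors := by
  intro v _ _
  unfold Spec_get_tail_of_vectors get_tail_of_vectors_alt
  match v with
  | [] => simp [get_tail_of_vectors, PySem.List.pyRange]
  | x :: rest => exact portA_eq_walk x rest
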